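-- pv_equiv track=rewrite | github.com/john9384/My_freeCodeCamp_solutions | Scientific computing with python/Time calculator/time_calculator.py | week_count
-- ===== SOURCE A (Python) =====
-- def week_count(count):
--     week_days = {
--         1:"sunday",
--         2:"monday",
--         3:"tuesday",
--         4:"wednesday",
--         5:"thursday",
--         6:"friday",
--         7:"saturday",
--     }
--     if count > 7:
--       count -= 7
--       return week_count(count)
--     return week_days[count]
-- ===== SOURCE B (Python) =====
-- def week_count(count):
--     names = ["sunday", "monday", "tuesday", "wednesday",
--              "thursday", "friday", "saturday"]
--     return names[(count - 1) % 7]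
-- ===== Notes on version B (the rewrite author's own statement) =====
-- stated objective: simpler
-- what changed: Replaces the recursive subtract-7 reduction over a 1-based dict with a single modular index (count-1)%7 into a 0-based list of names.
import Mathlib
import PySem

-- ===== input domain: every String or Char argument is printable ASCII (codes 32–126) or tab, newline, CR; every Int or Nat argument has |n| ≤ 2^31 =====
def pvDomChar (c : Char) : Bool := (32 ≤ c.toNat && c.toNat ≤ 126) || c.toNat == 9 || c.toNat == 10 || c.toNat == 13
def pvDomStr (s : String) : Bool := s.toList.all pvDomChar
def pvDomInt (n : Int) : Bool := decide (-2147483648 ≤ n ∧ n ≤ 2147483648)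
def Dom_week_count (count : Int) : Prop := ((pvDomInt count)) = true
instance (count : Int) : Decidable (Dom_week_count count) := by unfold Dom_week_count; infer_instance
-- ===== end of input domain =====

-- B drops A's 1-based dict and recursive subtraction of 7 for one modular index into a 0-based list; equivalence of RETURN values on count ≥ 1.

-- ===== PORT A =====
-- the literal dict from the Python source
def pvWeekDays : PySem.Dict Int String :=
  PySem.Dict.ofList [(1, "sunday"), (2, "monday"), (3, "tuesday"), (4, "wednesday"),
                     (5, "thursday"), (6, "friday"), (7, "saturday")]

-- week_days[count] raises KeyError outside 1..7; those inputs are outside Pre_ (getD's default is never reached there)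
def week_count (count : Int) : String :=
  if _h : count > 7 then
    week_count (count - 7)
  else
    (pvWeekDays.get? count).getD ""
termination_by count.toNat
decreasing_by omega

-- ===== PORT B =====
def pvNames : List String :=
  ["sunday", "monday", "tuesday", "wednesday", "thursday", "friday", "saturday"]

-- the index (count-1) % 7 (Python mod) always lies in 0..6, so pyGet? is always some; getD "" is never reached
def week_count_alt (count : Int) : String :=
  (PySem.List.pyGet? pvNames (PySem.Int.mod (count - 1) 7)).getD ""

-- ===== PRECONDITION & SPEC =====
-- Pre_ excludes count ≤ 0: there A's dict lookup raises KeyError (no value is returned).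
def Pre_week_count (count : Int) : Prop := 1 ≤ count
instance (count : Int) : Decidable (Pre_week_count count) := by unfold Pre_week_count; infer_instance
def pvWitness_week_count : Int := 9

def Spec_week_count (count : Int) (out : String) : Prop := out = week_count_alt count
instance (count : Int) (out : String) : Decidable (Spec_week_count count out) := by unfold Spec_week_count; infer_instance

-- ===== CLAIM (what is proved, stated in full; the proofs are below) =====
def Claim_equal_week_count : Prop := ∀ (count : Int), Dom_week_count count → Pre_week_count count → Spec_week_count count (week_count count)

-- ===== LEMMAS AND PROOFS =====

-- B's closed form is invariant under subtracting 7
lemma alt_shift (c : Int) : week_count_alt c = week_count_alt (c - 7) := by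
  unfold week_count_alt
  rw [PySem.Int.mod_eq_emod_of_pos (by norm_num), PySem.Int.mod_eq_emod_of_pos (by norm_num)]
  have : (c - 7 - 1) % 7 = (c - 1) % 7 := by omega
  rw [this]

lemma eq_of_pos (c : Int) (h : 1 ≤ c) : week_count c = week_count_alt c := by
  by_cases h7 : 7 < c
  · have hA : week_count c = week_count (c - 7) := by rw [week_count]; simp [h7]
    rw [hA, eq_of_pos (c - 7) (by omega), ← alt_shift c]
  · have h2 : c ≤ 7 := by omega
    interval_cases c <;> (rw [week_count]; decide)
termination_by c.toNat
decreasing_by omega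

-- ===== VERDICT (by name: the statement is the Claim_ definition above) =====
theorem week_count_spec : Claim_equal_week_count := by
  intro c _ h
  exact eq_of_pos c h
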